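-- pv_equiv track=rewrite | github.com/LaGamma/AOC | 6ab.py | solve
-- ===== SOURCE A (Python) =====
-- def solve(lines, part='a'):
-- 	count = 0
-- 	p_count = 0
-- 	d = dict()
-- 	for line in lines:
-- 		if line == '\n':
-- 			if part == 'b':
-- 				# add the # of questions to which everyone in the group said yes
-- 				count += sum(p_count == d[c] for c in d)
-- 			else:
-- 				# add the # of unique questions to which the group said yes
-- 				count += len(d)
-- 			p_count = 0
-- 			d = dict()
--
-- 		else:
-- 			# add next person's questions in group
-- 			p_count += 1
-- 			for c in line.strip():
-- 				if c in d:
-- 					d[c] += 1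
-- 				else:
-- 					d[c] = 1
--
-- 	# handle last case
-- 	if part == 'b':
-- 		# add the # of questions to which everyone in the group said yes
-- 		count += sum(p_count == d[c] for c in d)
-- 	else:
-- 		# add the # of unique questions to which the group said yes
-- 		count += len(d)
-- 	return count
-- ===== SOURCE B (Python) =====
-- def _scan(s, people):
--     # s is sorted; count maximal runs, and runs whose length == people
--     if not s:
--         return (0, 0)
--     c = s[0]
--     k = 1
--     while k < len(s) and s[k] == c:
--         k += 1
--     runs, full = _scan(s[k:], people)
--     return (runs + 1, full + (1 if k == people else 0))
--
--
-- def _score(chars, people, part):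
--     runs, full = _scan(sorted(chars), people)
--     return full if part == 'b' else runs
--
--
-- def solve(lines, part='a'):
--     total = 0
--     chars = []
--     people = 0
--     for line in lines:
--         if line == '\n':
--             total += _score(chars, people, part)
--             chars = []
--             people = 0
--         else:
--             people += 1
--             chars.extend(line.strip())
--     return total + _score(chars, people, part)
-- ===== Notes on version B (the rewrite author's own statement) =====
-- stated objective: alternative
-- what changed: Replaces A's incrementally-maintained per-character dict counter with collecting each group's raw characters, sorting them at group end, and counting maximal runs (a run of length == group size is a question everyone answered) by a recursive run scan.
import Mathlib
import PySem

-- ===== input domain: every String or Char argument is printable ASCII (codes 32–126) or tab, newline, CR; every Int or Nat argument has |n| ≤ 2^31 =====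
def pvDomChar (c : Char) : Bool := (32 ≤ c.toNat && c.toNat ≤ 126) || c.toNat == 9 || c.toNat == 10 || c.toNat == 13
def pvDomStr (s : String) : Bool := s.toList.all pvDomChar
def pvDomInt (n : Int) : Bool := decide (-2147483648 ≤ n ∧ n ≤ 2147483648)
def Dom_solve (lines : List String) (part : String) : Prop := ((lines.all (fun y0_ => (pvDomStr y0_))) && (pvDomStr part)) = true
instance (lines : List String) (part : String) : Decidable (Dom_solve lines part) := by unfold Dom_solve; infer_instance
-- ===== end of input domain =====

-- B replaces A's incrementally-maintained per-character dict counter with collecting each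
-- group's raw characters, sorting them at group end and counting maximal runs recursively.

-- ===== PORT A =====
-- the two 'count += …' expressions after a group ends (d[c] read as getD: c ranges over d's keys)
def solveFin (part : String) (p : Int) (d : PySem.Dict Char Int) : Int :=
  if part == "b" then (d.keys.map (fun c => if p == d.getD c 0 then (1 : Int) else 0)).sum
  else (PySem.Dict.size d : Int)

-- the body of A's 'for line in lines' loop, state (count, p_count, d)
def solveStep (part : String) (st : Int × Int × PySem.Dict Char Int) (line : String) :
    Int × Int × PySem.Dict Char Int :=
  if line == "\n" then
    (st.1 + solveFin part st.2.1 st.2.2, 0, PySem.Dict.empty)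
  else
    (st.1, st.2.1 + 1,
      (PySem.Str.strip line).toList.foldl
        (fun d c => if d.contains c then d.insert c (d.getD c 0 + 1) else d.insert c 1) st.2.2)

def solve (lines : List String) (part : String) : Int :=
  let st := lines.foldl (solveStep part) (0, 0, PySem.Dict.empty)
  st.1 + solveFin part st.2.1 st.2.2

-- ===== PORT B =====
-- _scan(s, people): s sorted; count maximal runs and runs of length == people
def scanRuns (s : List Char) (people : Int) : Int × Int :=
  match s with
  | [] => (0, 0)
  | c :: t =>
      let run := t.takeWhile (fun x => x == c)
      let r := scanRuns (t.dropWhile (fun x => x == c)) people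
      (r.1 + 1, r.2 + if ((1 + run.length : Int)) == people then 1 else 0)
termination_by s.length
decreasing_by
  simp only [List.length_cons]
  exact Nat.lt_succ_of_le (List.length_dropWhile_le _ _)

-- _score(chars, people, part)
def scoreB (chars : List Char) (people : Int) (part : String) : Int :=
  let r := scanRuns (PySem.List.sorted chars (fun x => x) false) people
  if part == "b" then r.2 else r.1

def solve_alt (lines : List String) (part : String) : Int :=
  let st := lines.foldl
    (fun (st : Int × List Char × Int) line =>
      if line == "\n" then (st.1 + scoreB st.2.1 st.2.2 part, [], 0)
      else (st.1, st.2.1 ++ (PySem.Str.strip line).toList, st.2.2 + 1))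
    (0, [], 0)
  st.1 + scoreB st.2.1 st.2.2 part

-- ===== PRECONDITION & SPEC =====
def Spec_solve (lines : List String) (part : String) (out : Int) : Prop := out = solve_alt lines part
instance (lines : List String) (part : String) (out : Int) : Decidable (Spec_solve lines part out) := by unfold Spec_solve; infer_instance

-- ===== CLAIM (what is proved, stated in full; the proofs are below) =====
def Claim_equal_solve : Prop := ∀ (lines : List String) (part : String), Dom_solve lines part → Spec_solve lines part (solve lines part)

-- ===== LEMMAS AND PROOFS =====

-- A's loop and final flush, as one function of the loop state
def runA (part : String) (ls : List String) (st : Int × Int × PySem.Dict Char Int) : Int :=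
  let r := ls.foldl (solveStep part) st
  r.1 + solveFin part r.2.1 r.2.2

-- B's loop step (the lambda in solve_alt) and B's loop with final flush
def stepB (part : String) (st : Int × List Char × Int) (line : String) : Int × List Char × Int :=
  if line == "\n" then (st.1 + scoreB st.2.1 st.2.2 part, [], 0)
  else (st.1, st.2.1 ++ (PySem.Str.strip line).toList, st.2.2 + 1)

def runB (part : String) (ls : List String) (st : Int × List Char × Int) : Int :=
  let r := ls.foldl (stepB part) st
  r.1 + scoreB r.2.1 r.2.2 part

theorem runA_cons (part l : String) (ls : List String) (st : Int × Int × PySem.Dict Char Int) :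
    runA part (l :: ls) st = runA part ls (solveStep part st l) := rfl

theorem runB_cons (part l : String) (ls : List String) (st : Int × List Char × Int) :
    runB part (l :: ls) st = runB part ls (stepB part st l) := rfl

theorem cntStep_eq :
    (fun (d : PySem.Dict Char Int) c => if d.contains c then d.insert c (d.getD c 0 + 1) else d.insert c 1)
    = (fun (d : PySem.Dict Char Int) c => d.insert c (d.getD c 0 + 1)) := by
  funext d c
  by_cases h : d.contains c = true
  · rw [if_pos h]
  · simp only [Bool.not_eq_true] at h
    rw [if_neg (by simp [h]), PySem.Dict.getD_of_not_contains d (0 : Int) h]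
    norm_num

theorem counter_extend (a b : List Char) :
    b.foldl (fun (d : PySem.Dict Char Int) c => d.insert c (d.getD c 0 + 1)) (PySem.Dict.counter a)
    = PySem.Dict.counter (a ++ b) := by
  rw [← PySem.Dict.foldl_insert_getD_add_one_eq_counter,
      ← PySem.Dict.foldl_insert_getD_add_one_eq_counter, List.foldl_append]

theorem dropWhile_head_false {A : Type} (p : A → Bool) :
    ∀ (l : List A) {d : A} {r : List A}, l.dropWhile p = d :: r → p d = false := by
  intro l
  induction l with
  | nil => intro d r h; simp at h
  | cons a t ih =>
      intro d r h
      rw [List.dropWhile_cons] at h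
      by_cases hp : p a = true
      · rw [if_pos hp] at h; exact ih h
      · rw [if_neg hp] at h
        injection h with h1 _
        rw [← h1]
        simpa using hp

-- B's run scan on a sorted list returns (#distinct values, #values occurring exactly `people` times)
theorem scan_spec : ∀ (n : Nat) (s : List Char), s.length ≤ n → s.Pairwise (· ≤ ·) → ∀ (p : Int),
    scanRuns s p = (((PySem.Set.ofList s).length : Int),
      ((PySem.Set.ofList s).countP (fun c => ((s.count c : Int)) == p) : Int)) := by
  intro n
  induction n with
  | zero =>
      intro s hs _ p
      have hnil : s = [] := by
        exact List.length_eq_zero_iff.mp (Nat.le_zero.mp hs)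
      subst hnil
      simp [scanRuns, PySem.Set.ofList_nil]
  | succ n ih =>
      intro s hs hpw p
      cases s with
      | nil => simp [scanRuns, PySem.Set.ofList_nil]
      | cons c t =>
        have htr : t.takeWhile (fun x => x == c) ++ t.dropWhile (fun x => x == c) = t :=
          List.takeWhile_append_dropWhile
        rcases List.pairwise_cons.mp hpw with ⟨hc, ht⟩
        have hsub : List.Sublist (t.dropWhile (fun x => x == c)) t := by
          exact List.dropWhile_sublist _
        have hrest_pw : (t.dropWhile (fun x => x == c)).Pairwise (· ≤ ·) :=
          List.Pairwise.sublist hsub ht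
        have hrun : ∀ x ∈ t.takeWhile (fun x => x == c), x = c := by
          intro x hx
          have hpx : (fun y => y == c) x = true :=
            List.mem_takeWhile_imp (p := fun y => y == c) (l := t) hx
          exact eq_of_beq hpx
        have hcrest : ∀ x ∈ t.dropWhile (fun x => x == c), x ≠ c := by
          intro x hx
          cases hr : t.dropWhile (fun x => x == c) with
          | nil => rw [hr] at hx; cases hx
          | cons d r =>
            have hd : (d == c) = false := dropWhile_head_false (fun y => y == c) t hr
            have hdne : d ≠ c := by simpa using hd
            have hdt : d ∈ t := hsub.subset (by rw [hr]; simp)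
            have hcd : c < d := lt_of_le_of_ne (hc d hdt) (fun e => hdne e.symm)
            rw [hr] at hx
            rcases List.mem_cons.mp hx with rfl | hxr
            · exact hdne
            · have hrpw := hrest_pw
              rw [hr] at hrpw
              have hdx : d ≤ x := (List.pairwise_cons.mp hrpw).1 x hxr
              intro e
              rw [e] at hdx
              exact absurd hcd (not_lt.mpr hdx)
        have hlen : (t.dropWhile (fun x => x == c)).length ≤ n := by
          have h1 := List.length_dropWhile_le (fun x => x == c) t
          have h2 : t.length + 1 ≤ n + 1 := by simpa using hs
          omega
        have hIH := ih (t.dropWhile (fun x => x == c)) hlen hrest_pw p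
        have hcnt_c : (c :: t).count c = (t.takeWhile (fun x => x == c)).length + 1 := by
          have h3 : t.count c
              = (t.takeWhile (fun x => x == c)).count c + (t.dropWhile (fun x => x == c)).count c := by
            conv_lhs => rw [← htr]
            rw [List.count_append]
          have h1 : (t.takeWhile (fun x => x == c)).count c = (t.takeWhile (fun x => x == c)).length :=
            List.count_eq_length.mpr (fun b hb => (hrun b hb).symm)
          have h2 : (t.dropWhile (fun x => x == c)).count c = 0 :=
            List.count_eq_zero.mpr (fun hmem => hcrest c hmem rfl)
          rw [List.count_cons_self, h3]
          omega
        have hcnt_ne : ∀ x : Char, x ≠ c → (c :: t).count x = (t.dropWhile (fun y => y == c)).count x := by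
          intro x hne
          have hcc : (c :: t).count x = t.count x := by
            simp [List.count_cons]
            exact fun e => hne e.symm
          have h3 : t.count x
              = (t.takeWhile (fun y => y == c)).count x + (t.dropWhile (fun y => y == c)).count x := by
            conv_lhs => rw [← htr]
            rw [List.count_append]
          have h1 : (t.takeWhile (fun y => y == c)).count x = 0 :=
            List.count_eq_zero.mpr (fun hmem => hne (hrun x hmem))
          omega
        have hnotm : c ∉ PySem.Set.ofList (t.dropWhile (fun x => x == c)) := by
          intro hmem
          have hcm : c ∈ t.dropWhile (fun x => x == c) := by
            simp only [PySem.Set.mem_ofList] at hmem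
            exact hmem
          exact hcrest c hcm rfl
        have hnodup2 : (c :: PySem.Set.ofList (t.dropWhile (fun x => x == c))).Nodup := by
          refine List.nodup_cons.mpr ⟨hnotm, ?_⟩
          exact PySem.Set.nodup_ofList _
        have hperm : (PySem.Set.ofList (c :: t)).Perm
            (c :: PySem.Set.ofList (t.dropWhile (fun x => x == c))) := by
          refine (List.perm_ext_iff_of_nodup ?_ hnodup2).mpr ?_
          · exact PySem.Set.nodup_ofList _
          · intro x
            simp only [PySem.Set.mem_ofList, List.mem_cons]
            constructor
            · rintro (rfl | hxt)
              · exact Or.inl rfl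
              · rw [← htr] at hxt
                rcases List.mem_append.mp hxt with hxr | hxd
                · exact Or.inl (hrun x hxr)
                · exact Or.inr hxd
            · rintro (rfl | hxd)
              · exact Or.inl rfl
              · exact Or.inr (by rw [← htr]; exact List.mem_append.mpr (Or.inr hxd))
        simp only [scanRuns]
        rw [hIH]
        refine Prod.ext ?_ ?_
        · show ((PySem.Set.ofList (t.dropWhile (fun x => x == c))).length : Int) + 1
            = ((PySem.Set.ofList (c :: t)).length : Int)
          have hl2 : (PySem.Set.ofList (c :: t)).length
              = (PySem.Set.ofList (t.dropWhile (fun x => x == c))).length + 1 := by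
            rw [hperm.length_eq]; simp
          rw [hl2]; push_cast; ring
        · show ((PySem.Set.ofList (t.dropWhile (fun x => x == c))).countP
              (fun x => (((t.dropWhile (fun y => y == c)).count x : Int)) == p) : Int)
            + (if ((1 + ((t.takeWhile (fun x => x == c)).length : Int)) == p) = true then 1 else 0)
            = ((PySem.Set.ofList (c :: t)).countP (fun x => (((c :: t).count x : Int)) == p) : Int)
          have hc2 : List.countP (fun x => (((c :: t).count x : Int)) == p) (PySem.Set.ofList (c :: t))
              = List.countP (fun x => (((c :: t).count x : Int)) == p)
                  (c :: PySem.Set.ofList (t.dropWhile (fun x => x == c))) := by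
            exact hperm.countP_eq _
          rw [hc2, List.countP_cons]
          have hcongr : List.countP (fun x => (((c :: t).count x : Int)) == p)
                (PySem.Set.ofList (t.dropWhile (fun x => x == c)))
              = List.countP (fun x => (((t.dropWhile (fun y => y == c)).count x : Int)) == p)
                (PySem.Set.ofList (t.dropWhile (fun x => x == c))) := by
            apply List.countP_congr
            intro x hx
            simp only [PySem.Set.mem_ofList] at hx
            rw [hcnt_ne x (hcrest x hx)]
          rw [hcongr]
          have hpc : ((((c :: t).count c : Int)) == p)
              = ((1 + ((t.takeWhile (fun x => x == c)).length : Int)) == p) := by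
            rw [hcnt_c]
            congr 1
            push_cast
            ring
          rw [hpc]
          split_ifs <;> push_cast <;> ring

-- A's group finalization = B's per-group score
theorem fin_eq_score (part : String) (p : Int) (l : List Char) :
    solveFin part p (PySem.Dict.counter l) = scoreB l p part := by
  have hpw : (PySem.List.sorted l (fun x => x) false).Pairwise (· ≤ ·) := by
    simpa using PySem.List.sorted_pairwise (xs := l) (key := fun x => x)
  have hsp := scan_spec (PySem.List.sorted l (fun x => x) false).length _ le_rfl hpw p
  have hperm : (PySem.List.sorted l (fun x => x) false).Perm l := by
    exact PySem.List.sorted_perm _ _ _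
  have hcnt : ∀ x : Char, (PySem.List.sorted l (fun x => x) false).count x = l.count x :=
    fun x => hperm.count_eq x
  have hsetperm : (PySem.Set.ofList (PySem.List.sorted l (fun x => x) false)).Perm
      (PySem.Set.ofList l) := by
    refine (List.perm_ext_iff_of_nodup ?_ ?_).mpr ?_
    · exact PySem.Set.nodup_ofList _
    · exact PySem.Set.nodup_ofList _
    · intro x
      simp only [PySem.Set.mem_ofList]
      exact hperm.mem_iff
  have hbeq : ∀ y : Int, (p == y) = (y == p) := by
    intro y
    by_cases h : p = y
    · subst h; rfl
    · have h2 : ¬ y = p := fun e => h e.symm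
      simp [h, h2]
  unfold solveFin scoreB
  simp only [hsp]
  by_cases hb : (part == "b") = true
  · rw [if_pos hb, if_pos hb]
    rw [PySem.Dict.keys_counter, PySem.List.sum_map_ite_one_zero]
    congr 1
    rw [show List.countP (fun c => (((PySem.List.sorted l (fun x => x) false).count c : Int)) == p)
          (PySem.Set.ofList (PySem.List.sorted l (fun x => x) false))
        = List.countP (fun c => (((PySem.List.sorted l (fun x => x) false).count c : Int)) == p)
          (PySem.Set.ofList l) from by
      exact hsetperm.countP_eq _]
    simp only [hcnt]
    apply List.countP_congr
    intro x hx
    rw [PySem.Dict.getD_counter, hbeq]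
  · rw [if_neg hb, if_neg hb]
    have hk : (PySem.Dict.counter l).keys.length = (PySem.Set.ofList l).length := by
      rw [PySem.Dict.keys_counter]
    simp only [PySem.Dict.keys, List.length_map] at hk
    simp only [PySem.Dict.size]
    rw [hsetperm.length_eq]
    exact_mod_cast hk

-- the two loops, stepped together
theorem loop_eq (part : String) : ∀ (ls : List String) (cnt p : Int) (l : List Char),
    runA part ls (cnt, p, PySem.Dict.counter l) = runB part ls (cnt, l, p) := by
  intro ls
  induction ls with
  | nil =>
      intro cnt p l
      show cnt + solveFin part p (PySem.Dict.counter l) = cnt + scoreB l p part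
      rw [fin_eq_score]
  | cons line ls ih =>
      intro cnt p l
      rw [runA_cons, runB_cons]
      by_cases h : (line == "\n") = true
      · have ha : solveStep part (cnt, p, PySem.Dict.counter l) line
            = (cnt + solveFin part p (PySem.Dict.counter l), 0, PySem.Dict.counter []) := by
          unfold solveStep
          rw [if_pos h]
          rfl
        have hbst : stepB part (cnt, l, p) line = (cnt + scoreB l p part, [], 0) := by
          unfold stepB
          rw [if_pos h]
        rw [ha, hbst, fin_eq_score]
        exact ih (cnt + scoreB l p part) 0 []
      · have ha : solveStep part (cnt, p, PySem.Dict.counter l) line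
            = (cnt, p + 1, PySem.Dict.counter (l ++ (PySem.Str.strip line).toList)) := by
          unfold solveStep
          rw [if_neg h]
          have hd : (PySem.Str.strip line).toList.foldl
              (fun d c => if d.contains c then d.insert c (d.getD c 0 + 1) else d.insert c 1)
              (PySem.Dict.counter l) = PySem.Dict.counter (l ++ (PySem.Str.strip line).toList) := by
            rw [cntStep_eq, counter_extend]
          rw [hd]
        have hbst : stepB part (cnt, l, p) line
            = (cnt, l ++ (PySem.Str.strip line).toList, p + 1) := by
          unfold stepB
          rw [if_neg h]
        rw [ha, hbst]
        exact ih cnt (p + 1) (l ++ (PySem.Str.strip line).toList)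

-- ===== VERDICT (by name: the statement is the Claim_ definition above) =====
theorem solve_spec : Claim_equal_solve := by
  intro lines part _
  unfold Spec_solve
  show solve lines part = solve_alt lines part
  exact loop_eq part lines 0 0 []
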